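-- pv_equiv track=rewrite | github.com/shimshon4M/MyWork | wordExtract/wordExtractSVM.py | calc_label_nums
-- ===== SOURCE A (Python) =====
-- def calc_label_nums(labels):
--     nums=[0,0,0,0]
--     for l in labels:
--         if l=="0":
--             nums[0]+=1
--         elif l=="1":
--             nums[1]+=1
--         elif l=="3":
--             nums[2]+=1
--         elif l=="4":
--             nums[3]+=1
--     return nums
-- ===== SOURCE B (Python) =====
-- def calc_label_nums(labels):
--     return [labels.count(k) for k in ("0", "1", "3", "4")]
-- ===== Notes on version B (the rewrite author's own statement) =====
-- stated objective: simpler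
-- what changed: Replaced the single hand-written pass with a four-way if/elif chain mutating a fixed list by four independent counting passes, one list.count per tracked key, with no loop or mutable state of our own.
import Mathlib
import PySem

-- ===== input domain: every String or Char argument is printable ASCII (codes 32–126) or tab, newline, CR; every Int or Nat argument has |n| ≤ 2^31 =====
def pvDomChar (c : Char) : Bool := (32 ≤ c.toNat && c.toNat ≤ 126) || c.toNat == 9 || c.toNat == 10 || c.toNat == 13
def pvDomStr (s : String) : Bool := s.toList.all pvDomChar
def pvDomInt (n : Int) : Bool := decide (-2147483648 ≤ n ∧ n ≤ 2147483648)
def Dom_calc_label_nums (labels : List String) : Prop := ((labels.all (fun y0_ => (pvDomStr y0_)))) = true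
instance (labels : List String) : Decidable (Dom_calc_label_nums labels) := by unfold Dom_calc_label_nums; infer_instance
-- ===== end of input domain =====

-- B replaces A's single mutating if/elif pass by four independent list.count passes (simpler, same total cost).
-- ===== PORT A =====
def calc_label_nums (labels : List String) : List Int :=
  let nums : List Int := [0, 0, 0, 0]
  labels.foldl (fun nums l =>
    if l = "0" then PySem.List.pySetD nums 0 (PySem.List.pyGetD nums 0 0 + 1)
    else if l = "1" then PySem.List.pySetD nums 1 (PySem.List.pyGetD nums 1 0 + 1)
    else if l = "3" then PySem.List.pySetD nums 2 (PySem.List.pyGetD nums 2 0 + 1)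
    else if l = "4" then PySem.List.pySetD nums 3 (PySem.List.pyGetD nums 3 0 + 1)
    else nums) nums

-- ===== PORT B =====
def calc_label_nums_alt (labels : List String) : List Int :=
  ["0", "1", "3", "4"].map (fun k => (PySem.List.count labels k : Int))

-- ===== PRECONDITION & SPEC =====
def Spec_calc_label_nums (labels : List String) (out : List Int) : Prop := out = calc_label_nums_alt labels
instance (labels : List String) (out : List Int) : Decidable (Spec_calc_label_nums labels out) := by unfold Spec_calc_label_nums; infer_instance

-- ===== CLAIM =====
def Claim_equal_calc_label_nums : Prop := ∀ (labels : List String), Dom_calc_label_nums labels → Spec_calc_label_nums labels (calc_label_nums labels)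

-- ===== LEMMAS AND PROOFS =====

-- A's loop body, named so the induction can treat one step at a time.
def stepA (nums : List Int) (l : String) : List Int :=
  if l = "0" then PySem.List.pySetD nums 0 (PySem.List.pyGetD nums 0 0 + 1)
  else if l = "1" then PySem.List.pySetD nums 1 (PySem.List.pyGetD nums 1 0 + 1)
  else if l = "3" then PySem.List.pySetD nums 2 (PySem.List.pyGetD nums 2 0 + 1)
  else if l = "4" then PySem.List.pySetD nums 3 (PySem.List.pyGetD nums 3 0 + 1)
  else nums

theorem calcA_eq_foldl (labels : List String) :
    calc_label_nums labels = labels.foldl stepA [0, 0, 0, 0] := rfl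

theorem stepA_eval (l : String) (a b c d : Int) :
    stepA [a, b, c, d] l =
      if l = "0" then [a + 1, b, c, d]
      else if l = "1" then [a, b + 1, c, d]
      else if l = "3" then [a, b, c + 1, d]
      else if l = "4" then [a, b, c, d + 1]
      else [a, b, c, d] := by
  simp only [stepA, PySem.List.pySetD, PySem.List.pySet?, PySem.List.pyGetD, PySem.List.pyGet?,
    PySem.List.pyIdx?]
  split_ifs <;> simp_all

-- A's loop, started from any 4-element accumulator, adds the per-key counts slot-wise.
theorem calcA_inv (labels : List String) (a b c d : Int) :
    labels.foldl stepA [a, b, c, d]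
      = [a + labels.count "0", b + labels.count "1", c + labels.count "3", d + labels.count "4"] := by
  induction labels generalizing a b c d with
  | nil => simp
  | cons l ls ih =>
    rw [List.foldl_cons, stepA_eval]
    split_ifs with h0 h1 h3 h4 <;> simp_all <;> ring

-- ===== VERDICT =====
theorem calc_label_nums_spec : Claim_equal_calc_label_nums := by
  intro labels _
  unfold Spec_calc_label_nums calc_label_nums_alt
  rw [calcA_eq_foldl, calcA_inv]
  simp [PySem.List.count_eq]
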